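-- pv_equiv track=rewrite | github.com/pablote3/python-tools | toolbox/python/ConditionalStatements.py | condition_for
-- ===== SOURCE A (Python) =====
-- def condition_for(fruits):
--     i = 0
--     for fruit in fruits:
--         if fruit is None:
--             continue
--         elif fruit == "strawberry":
--             break
--         i += 1
--     return i
-- ===== SOURCE B (Python) =====
-- def condition_for(fruits):
--     # boundary index of the first "strawberry" (or end of list), then arithmetic:
--     # prefix length minus the number of None entries in that prefix
--     k = fruits.index("strawberry") if "strawberry" in fruits else len(fruits)
--     return k - fruits[:k].count(None)
-- ===== Notes on version B (the rewrite author's own statement) =====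
-- stated objective: idiomatic
-- what changed: Instead of A's element-by-element loop with a counter, continue and break, B locates the boundary with list.index, slices the prefix, and computes the answer arithmetically as prefix length minus the prefix's None count.
import Mathlib
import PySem

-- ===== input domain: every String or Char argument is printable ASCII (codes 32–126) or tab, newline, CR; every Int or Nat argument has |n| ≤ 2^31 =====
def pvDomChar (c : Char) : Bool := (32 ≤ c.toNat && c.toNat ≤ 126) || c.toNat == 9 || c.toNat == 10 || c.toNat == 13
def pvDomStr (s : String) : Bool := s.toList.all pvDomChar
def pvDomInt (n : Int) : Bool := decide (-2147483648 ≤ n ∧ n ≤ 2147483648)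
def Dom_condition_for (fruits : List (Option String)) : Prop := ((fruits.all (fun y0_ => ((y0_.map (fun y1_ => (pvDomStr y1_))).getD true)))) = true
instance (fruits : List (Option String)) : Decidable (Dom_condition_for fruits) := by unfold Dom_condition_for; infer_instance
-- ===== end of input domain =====

-- B replaces A's counting loop by an index/slice/count arithmetic decomposition (idiomatic, same cost).


-- ===== PORT A =====
-- loop with continue/break and counter i, transliterated as recursion over the list
def condition_for_go (fruits : List (Option String)) (i : Int) : Int :=
  match fruits with
  | [] => i
  | f :: rest =>
    if f = none then condition_for_go rest i
    else if f = some "strawberry" then i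
    else condition_for_go rest (i + 1)

def condition_for (fruits : List (Option String)) : Int :=
  condition_for_go fruits 0

-- ===== PORT B =====
-- B: k = index of first "strawberry" (or len), answer = k - fruits[:k].count(None)
def condition_for_alt (fruits : List (Option String)) : Int :=
  let k : Nat := (PySem.List.index? fruits (some "strawberry")).getD fruits.length
  (k : Int) - ((PySem.List.slice fruits none (some (k : Int))).count none : Int)

-- ===== PRECONDITION & SPEC =====
def Spec_condition_for (fruits : List (Option String)) (out : Int) : Prop := out = condition_for_alt fruits
instance (fruits : List (Option String)) (out : Int) : Decidable (Spec_condition_for fruits out) := by unfold Spec_condition_for; infer_instance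

-- ===== CLAIM =====
def Claim_equal_condition_for : Prop := ∀ (fruits : List (Option String)), Dom_condition_for fruits → Spec_condition_for fruits (condition_for fruits)

-- ===== LEMMAS AND PROOFS =====
theorem alt_nil : condition_for_alt [] = 0 := by decide

theorem alt_cons_none (rest : List (Option String)) :
    condition_for_alt (none :: rest) = condition_for_alt rest := by
  simp only [condition_for_alt, PySem.List.index?_eq_idxOf?, List.idxOf?, List.findIdx?_cons,
    PySem.List.slice_to_natCast]
  cases h : List.findIdx? (fun x => x == some "strawberry") rest with
  | none => simp
  | some k => simp

theorem alt_cons_straw (rest : List (Option String)) :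
    condition_for_alt (some "strawberry" :: rest) = 0 := by
  simp [condition_for_alt, PySem.List.index?_eq_idxOf?, List.idxOf?, List.findIdx?_cons]

theorem alt_cons_other (s : String) (hs : s ≠ "strawberry") (rest : List (Option String)) :
    condition_for_alt (some s :: rest) = condition_for_alt rest + 1 := by
  simp only [condition_for_alt, PySem.List.index?_eq_idxOf?, List.idxOf?, List.findIdx?_cons,
    PySem.List.slice_to_natCast]
  cases h : List.findIdx? (fun x => x == some "strawberry") rest with
  | none => simp [hs]; omega
  | some k => simp [hs]; omega

theorem condition_for_go_eq (fruits : List (Option String)) (i : Int) :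
    condition_for_go fruits i = i + condition_for_alt fruits := by
  induction fruits generalizing i with
  | nil => simp [condition_for_go, alt_nil]
  | cons f rest ih =>
    cases f with
    | none => simp [condition_for_go, alt_cons_none, ih]
    | some s =>
      by_cases hs : s = "strawberry"
      · subst hs; simp [condition_for_go, alt_cons_straw]
      · simp [condition_for_go, hs, alt_cons_other s hs, ih]; ring
-- ===== VERDICT =====
theorem condition_for_spec : Claim_equal_condition_for := by
  intro fruits _
  unfold Spec_condition_for condition_for
  rw [condition_for_go_eq]
  ring
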